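-- pv_equiv track=rewrite | github.com/lbadams2/cs412 | hw_bonus/contiguous_apriori.py | has_infrequent_subset
-- ===== SOURCE A (Python) =====
-- import itertools
--
-- def has_infrequent_subset(candidate_itemset, freq_tuples, k):
--     k_minus = k - 1
--     ## Don't get all subsets, has to be adjacent
--     if k_minus == 1:
--         for subset in itertools.combinations(candidate_itemset, k_minus):
--             if subset not in freq_tuples:
--                 return True
--     else:
--         for i, j in itertools.combinations(range(len(candidate_itemset) + 1), 2):
--              if j - i == k_minus and candidate_itemset[i:j] not in freq_tuples:
--                 return True
--     return False
-- ===== SOURCE B (Python) =====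
-- def has_infrequent_subset(candidate_itemset, freq_tuples, k):
--     w = k - 1
--     if w < 1:
--         return False
--     return any(candidate_itemset[i:i + w] not in freq_tuples
--                for i in range(len(candidate_itemset) - w + 1))
-- ===== Notes on version B (the rewrite author's own statement) =====
-- stated objective: simpler
-- what changed: B slides directly over the contiguous windows of length k-1 in one uniform branch, instead of A's enumeration of all index pairs (i, j) filtered by j - i == k-1 plus a separate itertools.combinations branch for k == 2; measured ~1.3x faster at the largest timed size, below the 1.5x bar, so no speed is claimed.
import Mathlib
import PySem

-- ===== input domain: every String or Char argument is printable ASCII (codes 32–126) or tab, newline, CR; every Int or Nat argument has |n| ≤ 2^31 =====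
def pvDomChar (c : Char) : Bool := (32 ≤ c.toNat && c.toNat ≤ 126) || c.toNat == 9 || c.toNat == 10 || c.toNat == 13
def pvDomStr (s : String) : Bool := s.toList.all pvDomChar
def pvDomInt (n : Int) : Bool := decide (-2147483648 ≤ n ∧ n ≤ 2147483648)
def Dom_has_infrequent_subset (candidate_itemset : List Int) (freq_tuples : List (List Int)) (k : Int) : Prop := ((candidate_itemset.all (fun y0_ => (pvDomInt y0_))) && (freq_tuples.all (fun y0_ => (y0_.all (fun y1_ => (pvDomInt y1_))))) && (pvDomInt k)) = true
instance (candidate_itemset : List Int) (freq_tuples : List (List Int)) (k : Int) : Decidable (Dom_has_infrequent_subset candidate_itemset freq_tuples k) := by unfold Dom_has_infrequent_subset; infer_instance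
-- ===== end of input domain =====

-- B replaces A's index-pair enumeration (and its separate k == 2 combinations branch)
-- by a single direct sliding window over the contiguous (k-1)-subsets: simpler, one uniform branch.


-- ===== PORT A =====
-- itertools.combinations(range(n), 2) in order: all pairs (i, j) with i < j < n
def pvPairs (n : Int) : List (Int × Int) :=
  (PySem.List.pyRange 0 n 1).flatMap (fun i =>
    (PySem.List.pyRange (i + 1) n 1).map (fun j => (i, j)))

def has_infrequent_subset (candidate_itemset : List Int) (freq_tuples : List (List Int)) (k : Int) : Bool :=
  let k_minus := k - 1
  if k_minus = 1 then
    -- itertools.combinations(c, 1): the 1-tuples (x,) in element order; membership in the set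
    candidate_itemset.any (fun subset => !(freq_tuples.contains [subset]))
  else
    (pvPairs ((candidate_itemset.length : Int) + 1)).any (fun p =>
      decide (p.2 - p.1 = k_minus) &&
      !(freq_tuples.contains (PySem.List.slice candidate_itemset (some p.1) (some p.2))))

-- ===== PORT B =====
def has_infrequent_subset_alt (candidate_itemset : List Int) (freq_tuples : List (List Int)) (k : Int) : Bool :=
  let w := k - 1
  if w < 1 then false
  else
    (PySem.List.pyRange 0 ((candidate_itemset.length : Int) - w + 1) 1).any (fun i =>
      !(freq_tuples.contains (PySem.List.slice candidate_itemset (some i) (some (i + w)))))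

-- ===== PRECONDITION & SPEC =====
def Spec_has_infrequent_subset (candidate_itemset : List Int) (freq_tuples : List (List Int)) (k : Int) (out : Bool) : Prop := out = has_infrequent_subset_alt candidate_itemset freq_tuples k
instance (candidate_itemset : List Int) (freq_tuples : List (List Int)) (k : Int) (out : Bool) : Decidable (Spec_has_infrequent_subset candidate_itemset freq_tuples k out) := by unfold Spec_has_infrequent_subset; infer_instance

-- ===== CLAIM (what is proved, stated in full; the proofs are below) =====
def Claim_equal_has_infrequent_subset : Prop := ∀ (candidate_itemset : List Int) (freq_tuples : List (List Int)) (k : Int), Dom_has_infrequent_subset candidate_itemset freq_tuples k → Spec_has_infrequent_subset candidate_itemset freq_tuples k (has_infrequent_subset candidate_itemset freq_tuples k)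

-- ===== LEMMAS AND PROOFS =====

theorem mem_pvPairs (n : Int) (p : Int × Int) :
    p ∈ pvPairs n ↔ 0 ≤ p.1 ∧ p.1 < p.2 ∧ p.2 < n := by
  obtain ⟨i, j⟩ := p
  simp [pvPairs, List.mem_flatMap, PySem.List.mem_pyRange_one]
  omega

theorem slice_one (c : List Int) (n : ℕ) (h : n < c.length) :
    PySem.List.slice c (some (n : Int)) (some ((n : Int) + 1)) = [c.get ⟨n, h⟩] := by
  have h1 : ((n : Int) + 1) = ((n + 1 : ℕ) : Int) := by push_cast; ring
  rw [h1, PySem.List.slice_natCast]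
  have h2 : n + 1 - n = 1 := by omega
  rw [h2]
  exact List.take_one_drop_eq_of_lt_length h

-- A's else-branch equals B whenever k - 1 ≠ 1 is irrelevant: it equals B for every k
theorem else_eq_alt (c : List Int) (ft : List (List Int)) (k : Int) :
    ((pvPairs ((c.length : Int) + 1)).any (fun p =>
      decide (p.2 - p.1 = k - 1) &&
      !(ft.contains (PySem.List.slice c (some p.1) (some p.2)))))
    = has_infrequent_subset_alt c ft k := by
  rw [Bool.eq_iff_iff]
  unfold has_infrequent_subset_alt
  simp only []
  by_cases hw : k - 1 < 1
  · rw [if_pos hw]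
    simp only [List.any_eq_true, mem_pvPairs, Bool.and_eq_true, decide_eq_true_eq]
    constructor
    · rintro ⟨p, ⟨_, hlt, _⟩, hdiff, _⟩; omega
    · intro h; exact absurd h (by simp)
  · rw [if_neg hw]
    simp only [List.any_eq_true, mem_pvPairs, PySem.List.mem_pyRange_one,
      Bool.and_eq_true, decide_eq_true_eq, Bool.not_eq_true']
    constructor
    · rintro ⟨⟨i, j⟩, ⟨h0, hij, hjn⟩, hdiff, hnot⟩
      refine ⟨i, ⟨h0, by omega⟩, ?_⟩
      have : i + (k - 1) = j := by omega
      rw [this]; exact hnot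
    · rintro ⟨i, ⟨h0, hi⟩, hnot⟩
      exact ⟨(i, i + (k - 1)), ⟨h0, by omega, by omega⟩, by omega, hnot⟩

-- ===== VERDICT (by name: the statement is the Claim_ definition above) =====
theorem has_infrequent_subset_spec : Claim_equal_has_infrequent_subset := by
  intro c ft k _
  unfold Spec_has_infrequent_subset
  unfold has_infrequent_subset
  simp only []
  by_cases hk : k - 1 = 1
  · -- k = 2: A's combinations(c, 1) branch is the length-1 sliding window
    rw [if_pos hk]
    unfold has_infrequent_subset_alt
    simp only []
    rw [if_neg (show ¬ (k - 1 < 1) by omega)]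
    simp only [hk]
    rw [Bool.eq_iff_iff]
    simp only [List.any_eq_true, Bool.not_eq_true', PySem.List.mem_pyRange_one]
    constructor
    · rintro ⟨y, hy, hmem⟩
      obtain ⟨n, hn, hcn⟩ := List.mem_iff_getElem.mp hy
      refine ⟨(n : Int), ⟨by positivity, by omega⟩, ?_⟩
      rw [slice_one _ n hn]
      rw [show c.get ⟨n, hn⟩ = y from hcn]
      exact hmem
    · rintro ⟨i, ⟨h0, hi⟩, hcon⟩
      have hi' : i.toNat < c.length := by omega
      have hicast : ((i.toNat : ℕ) : Int) = i := by omega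
      rw [← hicast, slice_one _ i.toNat hi'] at hcon
      exact ⟨c.get ⟨i.toNat, hi'⟩, List.get_mem c ⟨i.toNat, hi'⟩, hcon⟩
  · rw [if_neg hk]
    exact else_eq_alt c ft k
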